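-- pv_equiv track=rewrite | github.com/JunHaaa/capstone | workspace/websocket.py | scheduling
-- ===== SOURCE A (Python) =====
-- def scheduling(question_scheduling_list):
--     scheduling_list_size = len(question_scheduling_list)
--     chatbot_id = 0
--     quequed_question_cnt = question_scheduling_list[chatbot_id]
--     for i in range(1, scheduling_list_size):
--         if quequed_question_cnt > question_scheduling_list[i]:
--             chatbot_id = i
--             quequed_question_cnt = question_scheduling_list[i]
--     question_scheduling_list[chatbot_id] += 1
--     return chatbot_id
-- ===== SOURCE B (Python) =====
-- def scheduling(question_scheduling_list):
--     # Sort the slot indices by their queued-question count (stable, so ties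
--     # keep the lowest index first) and take the front of that order.
--     order = sorted(range(len(question_scheduling_list)),
--                    key=lambda i: question_scheduling_list[i])
--     chatbot_id = order[0]
--     question_scheduling_list[chatbot_id] += 1
--     return chatbot_id
-- ===== Notes on version B (the rewrite author's own statement) =====
-- stated objective: alternative
-- what changed: Replaces A's single fused running-minimum scan with an index register by sort-then-pick: build the stable ordering of all indices sorted by their value and return its first element.
import Mathlib
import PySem

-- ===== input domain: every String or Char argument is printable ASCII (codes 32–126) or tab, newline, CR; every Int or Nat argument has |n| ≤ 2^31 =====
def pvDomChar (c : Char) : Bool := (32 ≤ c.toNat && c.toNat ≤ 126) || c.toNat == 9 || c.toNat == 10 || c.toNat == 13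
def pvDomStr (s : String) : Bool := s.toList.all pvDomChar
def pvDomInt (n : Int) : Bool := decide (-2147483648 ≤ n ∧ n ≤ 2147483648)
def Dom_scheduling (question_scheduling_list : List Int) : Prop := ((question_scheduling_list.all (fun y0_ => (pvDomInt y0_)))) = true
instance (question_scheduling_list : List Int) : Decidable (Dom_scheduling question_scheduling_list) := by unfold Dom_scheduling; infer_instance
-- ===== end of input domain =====

-- B replaces A's fused running-minimum scan by sort-then-pick (stable sort of the indices
-- by value, return the first); both Pythons also increment the chosen slot in place — the
-- equivalence proved here is about the RETURN value only.

-- ===== PORT A =====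
-- A's fused loop: running minimum with an index register, over range(1, len).
def scheduling (question_scheduling_list : List Int) : Int :=
  let scheduling_list_size : Int := question_scheduling_list.length
  let st :=
    (PySem.List.pyRange 1 scheduling_list_size 1).foldl
      (fun (s : Int × Int) i =>
        let v := PySem.List.pyGetD question_scheduling_list i 0
        if s.2 > v then (i, v) else s)
      (0, PySem.List.pyGetD question_scheduling_list 0 0)
  st.1

-- ===== PORT B =====
-- B: order = sorted(range(len(l)), key=lambda i: l[i]); return order[0].
def scheduling_alt (question_scheduling_list : List Int) : Int :=
  let order :=
    PySem.List.sorted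
      (PySem.List.pyRange 0 (question_scheduling_list.length : Int) 1)
      (fun i => PySem.List.pyGetD question_scheduling_list i 0) false
  match order with
  | [] => 0   -- unreachable under Pre_ (order[0] raises IndexError on the empty list)
  | k :: _ => k

-- ===== PRECONDITION & SPEC =====
-- Pre_ excludes only the empty list, on which A raises IndexError (and B too).
def Pre_scheduling (question_scheduling_list : List Int) : Prop := question_scheduling_list ≠ []
instance (question_scheduling_list : List Int) : Decidable (Pre_scheduling question_scheduling_list) := by unfold Pre_scheduling; infer_instance
def pvWitness_scheduling : List Int := ([3, 1, 2, 1])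
def Spec_scheduling (question_scheduling_list : List Int) (out : Int) : Prop := out = scheduling_alt question_scheduling_list
instance (question_scheduling_list : List Int) (out : Int) : Decidable (Spec_scheduling question_scheduling_list out) := by unfold Spec_scheduling; infer_instance

-- ===== CLAIM (what is proved, stated in full; the proofs are below) =====
def Claim_equal_scheduling : Prop := ∀ (question_scheduling_list : List Int), Dom_scheduling question_scheduling_list → Pre_scheduling question_scheduling_list → Spec_scheduling question_scheduling_list (scheduling question_scheduling_list)

-- ===== LEMMAS AND PROOFS =====

-- Inserting into a nonempty list: the new head is the smaller-keyed of x and the old head.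
theorem insertBy_cons_head (before : Int → Int → Bool) (x y : Int) (ys : List Int) :
    PySem.List.insertBy before x (y :: ys)
      = if before x y then x :: y :: ys else y :: PySem.List.insertBy before x ys := by
  simp [PySem.List.insertBy]

-- For any key f, the head of the stable sort of 0..n equals the state A's
-- running-minimum fold over 1..n reaches (together with its key).
theorem sorted_head_eq_fold (f : Int → Int) (n : Nat) :
    ∃ h t, PySem.List.sorted (PySem.List.pyRange 0 (1 + (n : Int)) 1) f false = h :: t ∧
      (PySem.List.pyRange 1 (1 + (n : Int)) 1).foldl
        (fun (s : Int × Int) i => if s.2 > f i then (i, f i) else s) (0, f 0)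
      = (h, f h) := by
  induction n with
  | zero =>
      refine ⟨0, [], ?_, ?_⟩
      · simp [PySem.List.sorted_eq_foldl_insertBy, PySem.List.pyRange_one_cons,
          PySem.List.pyRange_one_eq_nil, PySem.List.insertBy]
      · simp [PySem.List.pyRange_one_eq_nil]
  | succ n ih =>
      obtain ⟨h, t, hs, hf⟩ := ih
      have hc : (1 : Int) + ((n : Int) + 1) = (1 + (n : Int)) + 1 := by ring
      have hr0 : PySem.List.pyRange 0 (1 + ((n : Nat) + 1 : Nat) : Int) 1
          = PySem.List.pyRange 0 (1 + (n : Int)) 1 ++ [1 + (n : Int)] := by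
        push_cast
        rw [hc]
        exact PySem.List.pyRange_one_succ_right (by omega)
      have hr1 : PySem.List.pyRange 1 (1 + ((n : Nat) + 1 : Nat) : Int) 1
          = PySem.List.pyRange 1 (1 + (n : Int)) 1 ++ [1 + (n : Int)] := by
        push_cast
        rw [hc]
        exact PySem.List.pyRange_one_succ_right (by omega)
      have hsort : PySem.List.sorted (PySem.List.pyRange 0 (1 + ((n : Nat) + 1 : Nat) : Int) 1) f false
          = PySem.List.insertBy (fun a b => decide (f a < f b)) (1 + (n : Int)) (h :: t) := by
        rw [← hs, PySem.List.sorted_eq_foldl_insertBy, PySem.List.sorted_eq_foldl_insertBy,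
          hr0, List.foldl_append]
        rfl
      by_cases hlt : f (1 + (n : Int)) < f h
      · refine ⟨1 + (n : Int), h :: t, ?_, ?_⟩
        · rw [hsort, insertBy_cons_head, if_pos (by simpa using hlt)]
        · rw [hr1, List.foldl_append, hf]
          simp only [List.foldl_cons, List.foldl_nil]
          rw [if_pos (by omega)]
      · refine ⟨h, PySem.List.insertBy (fun a b => decide (f a < f b)) (1 + (n : Int)) t, ?_, ?_⟩
        · rw [hsort, insertBy_cons_head, if_neg (by simpa using hlt)]
        · rw [hr1, List.foldl_append, hf]
          simp only [List.foldl_cons, List.foldl_nil]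
          rw [if_neg (by omega)]

-- ===== VERDICT (by name: the statement is the Claim_ definition above) =====
theorem scheduling_spec : Claim_equal_scheduling := by
  intro l _ hpre
  cases l with
  | nil => exact absurd rfl hpre
  | cons x xs =>
      show scheduling (x :: xs) = scheduling_alt (x :: xs)
      obtain ⟨h, t, hs, hf⟩ :=
        sorted_head_eq_fold (fun i => PySem.List.pyGetD (x :: xs) i 0) xs.length
      have hlen : (((x :: xs).length : Nat) : Int) = 1 + (xs.length : Int) := by
        simp; omega
      unfold scheduling scheduling_alt
      simp only [hlen, hs, hf]
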